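-- pv_equiv track=rewrite | github.com/ariecattan/SciCo | eval/hypernym_50.py | get_candidate_clusters
-- ===== SOURCE A (Python) =====
-- def get_candidate_clusters(parent, children, clusters):
--     candidate_parents, candidate_children = [], []
--     for cluster_id, mentions in clusters.items():
--         intersect_x = [x for x in parent if x in mentions]
--         intersect_y = [x for x in children if x in mentions]
--
--         if len(intersect_x) >= 0.5 * len(parent):
--             candidate_parents.append(cluster_id)
--         if len(intersect_y) >= 0.5 * len(children):
--             candidate_children.append(cluster_id)
--
--     return candidate_parents, candidate_children
-- ===== SOURCE B (Python) =====
-- def get_candidate_clusters(parent, children, clusters):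
--     # Count each mention's multiplicity once, then per cluster sum counts over the
--     # distinct mentions instead of scanning parent/children per cluster.
--     parent_counts = {}
--     for x in parent:
--         parent_counts[x] = parent_counts.get(x, 0) + 1
--     children_counts = {}
--     for x in children:
--         children_counts[x] = children_counts.get(x, 0) + 1
--     candidate_parents, candidate_children = [], []
--     for cluster_id, mentions in clusters.items():
--         distinct = set(mentions)
--         p_hits = sum(parent_counts.get(m, 0) for m in distinct)
--         c_hits = sum(children_counts.get(m, 0) for m in distinct)
--         if 2 * p_hits >= len(parent):
--             candidate_parents.append(cluster_id)
--         if 2 * c_hits >= len(children):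
--             candidate_children.append(cluster_id)
--     return candidate_parents, candidate_children
-- ===== Notes on version B (the rewrite author's own statement) =====
-- stated objective: faster
-- what changed: Instead of scanning parent and children once per cluster to build intersection lists, B builds two count dictionaries once and, per cluster, sums the counts over the cluster's distinct mentions, comparing 2*hits against the list length in integers.
import Mathlib
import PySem

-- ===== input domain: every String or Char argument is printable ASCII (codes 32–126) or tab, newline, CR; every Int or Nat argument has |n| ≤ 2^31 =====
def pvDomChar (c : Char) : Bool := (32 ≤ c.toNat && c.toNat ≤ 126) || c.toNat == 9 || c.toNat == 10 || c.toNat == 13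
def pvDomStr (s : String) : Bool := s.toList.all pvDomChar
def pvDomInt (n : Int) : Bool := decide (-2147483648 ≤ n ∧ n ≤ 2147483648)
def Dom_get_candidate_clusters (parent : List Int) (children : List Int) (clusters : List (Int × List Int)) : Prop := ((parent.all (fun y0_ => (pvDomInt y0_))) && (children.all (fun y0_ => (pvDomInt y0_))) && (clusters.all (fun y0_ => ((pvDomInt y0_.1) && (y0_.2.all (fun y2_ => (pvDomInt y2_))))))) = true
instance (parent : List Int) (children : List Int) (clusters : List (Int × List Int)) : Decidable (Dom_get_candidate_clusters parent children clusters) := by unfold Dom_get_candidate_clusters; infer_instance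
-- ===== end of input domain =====

-- B replaces A's per-cluster scans over parent/children by two count dictionaries built
-- once and a per-cluster sum over the cluster's distinct mentions (objective: faster).


-- ===== PORT A =====
-- 'len(ix) >= 0.5 * len(parent)' is ported as '2 * len(ix) ≥ len(parent)': exact, since
-- 0.5 * n is exactly representable as a float for any list length n and both sides are ≥ 0.
def get_candidate_clusters (parent : List Int) (children : List Int) (clusters : List (Int × List Int)) : List Int × List Int :=
  clusters.foldl
    (fun st e =>
      let intersect_x := parent.filter (fun x => decide (x ∈ e.2))
      let intersect_y := children.filter (fun x => decide (x ∈ e.2))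
      let st1 := if 2 * intersect_x.length ≥ parent.length then (st.1 ++ [e.1], st.2) else st
      if 2 * intersect_y.length ≥ children.length then (st1.1, st1.2 ++ [e.1]) else st1)
    ([], [])

-- ===== PORT B =====
def get_candidate_clusters_alt (parent : List Int) (children : List Int) (clusters : List (Int × List Int)) : List Int × List Int :=
  let parent_counts := parent.foldl (fun d x => d.insert x (d.getD x 0 + 1)) (PySem.Dict.empty : PySem.Dict Int Int)
  let children_counts := children.foldl (fun d x => d.insert x (d.getD x 0 + 1)) (PySem.Dict.empty : PySem.Dict Int Int)
  clusters.foldl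
    (fun st e =>
      let distinct := PySem.Set.ofList e.2
      let p_hits := (distinct.map (fun m => parent_counts.getD m 0)).sum
      let c_hits := (distinct.map (fun m => children_counts.getD m 0)).sum
      let st1 := if 2 * p_hits ≥ (parent.length : Int) then (st.1 ++ [e.1], st.2) else st
      if 2 * c_hits ≥ (children.length : Int) then (st1.1, st1.2 ++ [e.1]) else st1)
    ([], [])

-- ===== PRECONDITION & SPEC =====
def Spec_get_candidate_clusters (parent : List Int) (children : List Int) (clusters : List (Int × List Int)) (out : List Int × List Int) : Prop := out = get_candidate_clusters_alt parent children clusters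
instance (parent : List Int) (children : List Int) (clusters : List (Int × List Int)) (out : List Int × List Int) : Decidable (Spec_get_candidate_clusters parent children clusters out) := by unfold Spec_get_candidate_clusters; infer_instance

-- ===== CLAIM (what is proved, stated in full; the proofs are below) =====
def Claim_equal_get_candidate_clusters : Prop := ∀ (parent : List Int) (children : List Int) (clusters : List (Int × List Int)), Dom_get_candidate_clusters parent children clusters → Spec_get_candidate_clusters parent children clusters (get_candidate_clusters parent children clusters)

-- ===== LEMMAS AND PROOFS =====

-- sum over a duplicate-free list S of the indicator 'x = m' is the membership indicator
lemma pv_indicator_sum (S : List Int) (x : Int) (hnd : S.Nodup) :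
    (S.map (fun m => if x = m then (1 : Int) else 0)).sum = if x ∈ S then 1 else 0 := by
  induction S with
  | nil => simp
  | cons m S' ih =>
    rcases List.nodup_cons.mp hnd with ⟨hm, hnd'⟩
    by_cases hx : x = m
    · subst hx
      simp [List.sum_cons, ih hnd', hm]
    · simp [List.sum_cons, hx, ih hnd']

-- summing p.count over a duplicate-free list S counts the elements of p lying in S
lemma pv_sum_count_eq_filter_length (p S : List Int) (hnd : S.Nodup) :
    (S.map (fun m => (p.count m : Int))).sum
      = ((p.filter (fun x => decide (x ∈ S))).length : Int) := by
  induction p with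
  | nil => simp
  | cons x t ih =>
    have hmap : S.map (fun m => ((x :: t).count m : Int))
        = S.map (fun m => (t.count m : Int) + if x = m then 1 else 0) := by
      apply List.map_congr_left
      intro m _
      rw [List.count_cons]
      by_cases h : x = m
      · simp [h]
      · simp [h]
    rw [hmap, PySem.List.sum_map_add_int, ih, pv_indicator_sum S x hnd]
    by_cases hx : x ∈ S
    · simp [hx]
    · simp [hx]

-- B's per-cluster sum of counts equals the length of A's per-cluster intersection list
lemma pv_hits_eq (p ms : List Int) :
    ((PySem.Set.ofList ms).map
        (fun m => (p.foldl (fun d x => d.insert x (d.getD x 0 + 1)) (PySem.Dict.empty : PySem.Dict Int Int)).getD m 0)).sum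
      = ((p.filter (fun x => decide (x ∈ ms))).length : Int) := by
  rw [PySem.Dict.foldl_insert_getD_add_one_eq_counter]
  simp only [PySem.Dict.getD_counter]
  have hf : p.filter (fun x => decide (x ∈ PySem.Set.ofList ms))
      = p.filter (fun x => decide (x ∈ ms)) := by
    apply List.filter_congr
    intro x _
    simp [PySem.Set.mem_ofList]
  rw [pv_sum_count_eq_filter_length p _ (PySem.Set.nodup_ofList ms), hf]

-- ===== VERDICT (by name: the statement is the Claim_ definition above) =====
theorem get_candidate_clusters_spec : Claim_equal_get_candidate_clusters := by
  intro parent children clusters _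
  show get_candidate_clusters parent children clusters = get_candidate_clusters_alt parent children clusters
  unfold get_candidate_clusters get_candidate_clusters_alt
  apply PySem.List.foldl_congr_mem
  intro acc e _
  dsimp only
  simp only [pv_hits_eq]
  have hp : ((2 : Int) * ((parent.filter (fun x => decide (x ∈ e.2))).length : Int) ≥ (parent.length : Int))
      ↔ (2 * (parent.filter (fun x => decide (x ∈ e.2))).length ≥ parent.length) := by
    exact_mod_cast Iff.rfl
  have hc : ((2 : Int) * ((children.filter (fun x => decide (x ∈ e.2))).length : Int) ≥ (children.length : Int))
      ↔ (2 * (children.filter (fun x => decide (x ∈ e.2))).length ≥ children.length) := by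
    exact_mod_cast Iff.rfl
  simp only [hp, hc]
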